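-- pv_equiv track=rewrite | github.com/Kainmueller-Lab/PatchPerPix | PatchPerPix/vote_instances/stitch_patch_graph.py | get_chessboard_offsets
-- ===== SOURCE A (Python) =====
-- def get_chessboard_offsets(total_shape, chunksize):
--     offsets = []
--     if len(total_shape) == 2:
--         for yi, y in enumerate(range(0, total_shape[0], chunksize[0])):
--             ymod = yi % 2
--             for xi, x in enumerate(range(0, total_shape[1], chunksize[1])):
--                 xmod = xi % 2
--                 offsets.append([2 * ymod + xmod, y, x])
--
--     if len(total_shape) == 3:
--         for zi, z in enumerate(range(0, total_shape[0], chunksize[0])):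
--             zmod = zi % 2
--             for yi, y in enumerate(range(0, total_shape[1], chunksize[1])):
--                 ymod = yi % 2
--                 for xi, x in enumerate(range(0, total_shape[2], chunksize[2])):
--                     xmod = xi % 2
--                     offsets.append([4 * zmod + 2 * ymod + xmod, z, y, x])
--
--     return offsets
-- ===== SOURCE B (Python) =====
-- def get_chessboard_offsets(total_shape, chunksize):
--     ndim = len(total_shape)
--     if ndim not in (2, 3):
--         return []
--     offsets = [[0]]
--     for d in range(ndim):
--         offsets = [[2 * cur[0] + i % 2] + cur[1:] + [pos]
--                    for cur in offsets
--                    for i, pos in enumerate(range(0, total_shape[d], chunksize[d]))]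
--     return offsets
-- ===== Notes on version B (the rewrite author's own statement) =====
-- stated objective: simpler
-- what changed: Replaced the two dimension-specific nested-loop blocks by one generic dimension-by-dimension pass: a single loop over the axes extends partial offset rows with each axis's chunk starts while folding the chessboard color incrementally as 2*color + i%2.
import Mathlib
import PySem

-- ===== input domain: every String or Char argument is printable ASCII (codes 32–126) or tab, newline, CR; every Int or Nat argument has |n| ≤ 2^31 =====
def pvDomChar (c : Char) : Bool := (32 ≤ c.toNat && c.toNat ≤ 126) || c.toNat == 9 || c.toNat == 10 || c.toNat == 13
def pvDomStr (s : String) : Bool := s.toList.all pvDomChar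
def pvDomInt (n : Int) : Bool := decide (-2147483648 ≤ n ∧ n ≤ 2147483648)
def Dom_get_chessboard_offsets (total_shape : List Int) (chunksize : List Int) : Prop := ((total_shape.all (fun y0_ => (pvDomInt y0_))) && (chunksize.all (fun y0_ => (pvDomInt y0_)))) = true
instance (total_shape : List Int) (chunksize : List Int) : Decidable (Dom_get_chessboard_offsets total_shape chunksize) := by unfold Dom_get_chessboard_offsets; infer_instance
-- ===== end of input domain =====

-- B replaces A's two hard-coded 2D/3D nested-loop blocks by one generic fold over the axes
-- that extends partial rows and folds the chessboard color incrementally (objective: simpler).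

-- ===== PORT A =====
def get_chessboard_offsets (total_shape : List Int) (chunksize : List Int) : List (List Int) :=
  let offsets : List (List Int) := []
  let offsets :=
    if total_shape.length = 2 then
      (PySem.List.enumerate (PySem.List.pyRange 0 (total_shape.getD 0 0) (chunksize.getD 0 0))).foldl
        (fun offs p =>
          let ymod := PySem.Int.mod p.1 2
          (PySem.List.enumerate (PySem.List.pyRange 0 (total_shape.getD 1 0) (chunksize.getD 1 0))).foldl
            (fun offs2 q =>
              let xmod := PySem.Int.mod q.1 2
              offs2 ++ [[2 * ymod + xmod, p.2, q.2]]) offs) offsets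
    else offsets
  if total_shape.length = 3 then
    (PySem.List.enumerate (PySem.List.pyRange 0 (total_shape.getD 0 0) (chunksize.getD 0 0))).foldl
      (fun offs p =>
        let zmod := PySem.Int.mod p.1 2
        (PySem.List.enumerate (PySem.List.pyRange 0 (total_shape.getD 1 0) (chunksize.getD 1 0))).foldl
          (fun offs2 q =>
            let ymod := PySem.Int.mod q.1 2
            (PySem.List.enumerate (PySem.List.pyRange 0 (total_shape.getD 2 0) (chunksize.getD 2 0))).foldl
              (fun offs3 r =>
                let xmod := PySem.Int.mod r.1 2
                offs3 ++ [[4 * zmod + 2 * ymod + xmod, p.2, q.2, r.2]]) offs2) offs) offsets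
  else offsets

-- ===== PORT B =====
def get_chessboard_offsets_alt (total_shape : List Int) (chunksize : List Int) : List (List Int) :=
  let ndim := total_shape.length
  if ndim = 2 ∨ ndim = 3 then
    (List.range ndim).foldl
      (fun offs d =>
        offs.flatMap (fun cur =>
          (PySem.List.enumerate (PySem.List.pyRange 0 (total_shape.getD d 0) (chunksize.getD d 0))).map
            (fun p => (2 * cur.headD 0 + PySem.Int.mod p.1 2) :: cur.tail ++ [p.2])))
      [[0]]
  else []

-- ===== PRECONDITION & SPEC =====
-- pvNE t c = true  iff  range(0, t, c) is non-empty
def pvNE (t c : Int) : Bool := (0 < t && 0 < c) || (t < 0 && c < 0)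

-- Pre_ excludes exactly the inputs on which A raises (ValueError for a zero range step,
-- IndexError for a too-short chunksize reached by a non-empty enclosing loop); B raises there too.
def Pre_get_chessboard_offsets (total_shape : List Int) (chunksize : List Int) : Prop :=
  (total_shape.length = 2 →
    1 ≤ chunksize.length ∧ chunksize.getD 0 0 ≠ 0 ∧
    (pvNE (total_shape.getD 0 0) (chunksize.getD 0 0) = true →
      2 ≤ chunksize.length ∧ chunksize.getD 1 0 ≠ 0)) ∧
  (total_shape.length = 3 →
    1 ≤ chunksize.length ∧ chunksize.getD 0 0 ≠ 0 ∧
    (pvNE (total_shape.getD 0 0) (chunksize.getD 0 0) = true →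
      2 ≤ chunksize.length ∧ chunksize.getD 1 0 ≠ 0 ∧
      (pvNE (total_shape.getD 1 0) (chunksize.getD 1 0) = true →
        3 ≤ chunksize.length ∧ chunksize.getD 2 0 ≠ 0)))
instance (total_shape : List Int) (chunksize : List Int) : Decidable (Pre_get_chessboard_offsets total_shape chunksize) := by unfold Pre_get_chessboard_offsets; infer_instance

def pvWitness_get_chessboard_offsets : List Int × List Int := ([4, 6], [2, 3])

def Spec_get_chessboard_offsets (total_shape : List Int) (chunksize : List Int) (out : List (List Int)) : Prop := out = get_chessboard_offsets_alt total_shape chunksize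
instance (total_shape : List Int) (chunksize : List Int) (out : List (List Int)) : Decidable (Spec_get_chessboard_offsets total_shape chunksize out) := by unfold Spec_get_chessboard_offsets; infer_instance

-- ===== CLAIM (what is proved, stated in full; the proofs are below) =====
def Claim_equal_get_chessboard_offsets : Prop := ∀ (total_shape : List Int) (chunksize : List Int), Dom_get_chessboard_offsets total_shape chunksize → Pre_get_chessboard_offsets total_shape chunksize → Spec_get_chessboard_offsets total_shape chunksize (get_chessboard_offsets total_shape chunksize)

-- ===== LEMMAS AND PROOFS =====

-- ===== VERDICT (by name: the statement is the Claim_ definition above) =====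
theorem get_chessboard_offsets_spec : Claim_equal_get_chessboard_offsets := by
  intro ts cs _ _
  unfold Spec_get_chessboard_offsets get_chessboard_offsets get_chessboard_offsets_alt
  by_cases h2 : ts.length = 2
  · simp [h2, List.range_succ]
    simp only [← List.flatMap_def, List.flatMap_map, ← List.map_eq_flatMap]
    simp
  · by_cases h3 : ts.length = 3
    · simp [h3, List.range_succ]
      simp only [← List.flatMap_def, List.flatMap_map, ← List.map_eq_flatMap]
      simp [List.flatMap_assoc, List.flatMap_map]
      ring_nf
    · simp [h2, h3]
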